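-- pv_equiv track=rewrite | github.com/YashJ02/AAI-6620-NLP-Final-Project | src/interpretation/rule_classifier.py | summarize_statuses
-- ===== SOURCE A (Python) =====
-- def summarize_statuses(classifications: list[dict]) -> dict:
--     summary = {"low": 0, "normal": 0, "high": 0, "unknown": 0}
--     for row in classifications:
--         status = row.get("status", "unknown")
--         if status not in summary:
--             status = "unknown"
--         summary[status] += 1
--     return summary
-- ===== SOURCE B (Python) =====
-- def summarize_statuses(classifications: list[dict]) -> dict:
--     statuses = [row.get("status", "unknown") for row in classifications]
--     low = statuses.count("low")
--     normal = statuses.count("normal")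
--     high = statuses.count("high")
--     return {"low": low, "normal": normal, "high": high,
--             "unknown": len(statuses) - low - normal - high}
-- ===== Notes on version B (the rewrite author's own statement) =====
-- stated objective: alternative
-- what changed: Replaces A's per-row normalize-and-increment updates of a summary dict by extracting the status list once, taking per-key counts for low/normal/high, and deriving the unknown bucket arithmetically as length minus the three counts.
import Mathlib
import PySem

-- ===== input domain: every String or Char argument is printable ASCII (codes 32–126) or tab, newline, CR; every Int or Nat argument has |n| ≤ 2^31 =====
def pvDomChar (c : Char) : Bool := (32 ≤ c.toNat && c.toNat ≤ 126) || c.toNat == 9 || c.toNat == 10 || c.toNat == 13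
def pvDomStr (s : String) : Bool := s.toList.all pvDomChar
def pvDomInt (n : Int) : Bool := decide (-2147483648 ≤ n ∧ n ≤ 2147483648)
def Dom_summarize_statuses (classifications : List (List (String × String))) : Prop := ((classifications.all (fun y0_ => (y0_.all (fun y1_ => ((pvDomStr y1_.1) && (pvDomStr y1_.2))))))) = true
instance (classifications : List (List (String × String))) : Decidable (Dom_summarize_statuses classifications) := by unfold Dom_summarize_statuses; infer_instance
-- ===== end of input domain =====

-- B replaces A's per-row normalize-and-increment dict loop by per-key count passes over the
-- extracted status list, deriving the "unknown" bucket arithmetically (objective: alternative).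

-- ===== PORT A =====
def summarize_statuses (classifications : List (List (String × String))) : List (String × Int) :=
  let init : PySem.Dict String Int :=
    PySem.Dict.mk [("low", 0), ("normal", 0), ("high", 0), ("unknown", 0)]
  (classifications.foldl (fun summary row =>
      let status := (PySem.Dict.mk row).getD "status" "unknown"
      let status := if summary.contains status then status else "unknown"
      summary.modify status 0 (· + 1)) init).items

-- ===== PORT B =====
def summarize_statuses_alt (classifications : List (List (String × String))) : List (String × Int) :=
  let statuses := classifications.map (fun row => (PySem.Dict.mk row).getD "status" "unknown")
  let low : Int := statuses.count "low"
  let normal : Int := statuses.count "normal"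
  let high : Int := statuses.count "high"
  [("low", low), ("normal", normal), ("high", high),
   ("unknown", (statuses.length : Int) - low - normal - high)]

-- ===== PRECONDITION & SPEC =====
def Spec_summarize_statuses (classifications : List (List (String × String))) (out : List (String × Int)) : Prop := out = summarize_statuses_alt classifications
instance (classifications : List (List (String × String))) (out : List (String × Int)) : Decidable (Spec_summarize_statuses classifications out) := by unfold Spec_summarize_statuses; infer_instance

-- ===== CLAIM (what is proved, stated in full; the proofs are below) =====
def Claim_equal_summarize_statuses : Prop := ∀ (classifications : List (List (String × String))), Dom_summarize_statuses classifications → Spec_summarize_statuses classifications (summarize_statuses classifications)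

-- ===== LEMMAS AND PROOFS =====

-- A's loop body, as a function of the already-looked-up status string
def pvStep (d : PySem.Dict String Int) (s : String) : PySem.Dict String Int :=
  d.modify (if d.contains s then s else "unknown") 0 (· + 1)

-- the statuses that do NOT land in one of the three named buckets land in "unknown"
def pvUnk (s : String) : Bool := !(s == "low" || s == "normal" || s == "high")

theorem count_split (l : List String) :
    l.countP pvUnk + l.count "low" + l.count "normal" + l.count "high" = l.length := by
  induction l with
  | nil => simp
  | cons s t ih =>
    simp only [List.countP_cons, List.count_cons, List.length_cons, pvUnk]
    by_cases h1 : s = "low" <;> by_cases h2 : s = "normal" <;> by_cases h3 : s = "high" <;>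
      simp_all <;> omega

-- loop invariant of A's fold: keys stay the four fixed keys, values count the statuses
theorem fold_inv (l : List String) (d : PySem.Dict String Int)
    (hk : d.keys = ["low", "normal", "high", "unknown"]) :
    (l.foldl pvStep d).keys = ["low", "normal", "high", "unknown"]
    ∧ (l.foldl pvStep d).getD "low" 0 = d.getD "low" 0 + (l.count "low" : Int)
    ∧ (l.foldl pvStep d).getD "normal" 0 = d.getD "normal" 0 + (l.count "normal" : Int)
    ∧ (l.foldl pvStep d).getD "high" 0 = d.getD "high" 0 + (l.count "high" : Int)
    ∧ (l.foldl pvStep d).getD "unknown" 0 = d.getD "unknown" 0 + (l.countP pvUnk : Int) := by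
  induction l generalizing d with
  | nil => simpa using hk
  | cons s t ih =>
    have hcont : ∀ x, d.contains x = decide (x ∈ ["low", "normal", "high", "unknown"]) := by
      intro x; rw [PySem.Dict.contains_eq_decide_mem_keys, hk]
    -- the key actually modified by the step
    have hstep : ∃ k, k ∈ ["low", "normal", "high", "unknown"]
        ∧ pvStep d s = d.modify k 0 (· + 1)
        ∧ (k = "low" ↔ s = "low") ∧ (k = "normal" ↔ s = "normal") ∧ (k = "high" ↔ s = "high")
        ∧ (k = "unknown" ↔ pvUnk s = true) := by
      by_cases hm : s ∈ ["low", "normal", "high", "unknown"]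
      · refine ⟨s, hm, by simp [pvStep, hcont, hm], ?_, ?_, ?_, ?_⟩ <;> (simp_all [pvUnk]; try aesop)
      · refine ⟨"unknown", by simp, by simp [pvStep, hcont, hm], ?_, ?_, ?_, ?_⟩ <;>
          simp_all [pvUnk] <;> aesop
    obtain ⟨k, hkm, hse, e1, e2, e3, e4⟩ := hstep
    have hk' : (d.modify k 0 (· + 1)).keys = ["low", "normal", "high", "unknown"] := by
      rw [PySem.Dict.keys_modify, PySem.Dict.keys_insert_of_contains, hk]
      rw [hcont]; simpa using hkm
    have := ih (d.modify k 0 (· + 1)) hk'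
    simp only [List.foldl_cons, hse]
    refine ⟨this.1, ?_, ?_, ?_, ?_⟩
    · rw [this.2.1, PySem.Dict.getD_modify, List.count_cons]
      by_cases hs : s = "low"
      · have hkk : k = "low" := e1.mpr hs
        simp [hkk, hs]; ring
      · have hkk : ¬ ("low" = k) := fun c => hs (e1.mp c.symm)
        simp [if_neg hkk, hs]
    · rw [this.2.2.1, PySem.Dict.getD_modify, List.count_cons]
      by_cases hs : s = "normal"
      · have hkk : k = "normal" := e2.mpr hs
        simp [hkk, hs]; ring
      · have hkk : ¬ ("normal" = k) := fun c => hs (e2.mp c.symm)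
        simp [if_neg hkk, hs]
    · rw [this.2.2.2.1, PySem.Dict.getD_modify, List.count_cons]
      by_cases hs : s = "high"
      · have hkk : k = "high" := e3.mpr hs
        simp [hkk, hs]; ring
      · have hkk : ¬ ("high" = k) := fun c => hs (e3.mp c.symm)
        simp [if_neg hkk, hs]
    · rw [this.2.2.2.2, PySem.Dict.getD_modify, List.countP_cons]
      by_cases hs : pvUnk s = true
      · have hkk : k = "unknown" := e4.mpr hs
        simp [hkk, hs]; ring
      · have hkk : ¬ ("unknown" = k) := fun c => hs (e4.mp c.symm)
        simp [if_neg hkk, hs]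
theorem summarize_statuses_spec : Claim_equal_summarize_statuses := by
  intro cs _
  unfold Spec_summarize_statuses summarize_statuses summarize_statuses_alt
  simp only
  rw [show (fun (summary : PySem.Dict String Int) (row : List (String × String)) =>
        summary.modify (if summary.contains ((PySem.Dict.mk row).getD "status" "unknown")
          then (PySem.Dict.mk row).getD "status" "unknown" else "unknown") 0 (· + 1))
      = (fun summary row => pvStep summary ((PySem.Dict.mk row).getD "status" "unknown")) from rfl]
  rw [← List.foldl_map (f := fun row => (PySem.Dict.mk row).getD "status" "unknown")]
  set l := cs.map (fun row => (PySem.Dict.mk row).getD "status" "unknown") with hl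
  have hinit : (PySem.Dict.mk [("low", (0:Int)), ("normal", 0), ("high", 0), ("unknown", 0)]).keys
      = ["low", "normal", "high", "unknown"] := by decide
  obtain ⟨h0, h1, h2, h3, h4⟩ := fold_inv l _ hinit
  have hsplit := count_split l
  rw [PySem.Dict.items_eq_map_keys _ (by rw [h0]; decide) 0, h0]
  simp only [List.map_cons, List.map_nil, h1, h2, h3, h4]
  have z : ∀ k : String, (PySem.Dict.mk [("low", (0:Int)), ("normal", 0), ("high", 0), ("unknown", 0)]).getD k 0 = 0 := by
    intro k
    simp [PySem.Dict.getD_eq_get?_getD, PySem.Dict.get?_mk_cons]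
    split_ifs <;> rfl
  rw [z, z, z, z]
  have hu : (0:Int) + (List.countP pvUnk l : Int)
      = (l.length : Int) - (List.count "low" l : Int) - (List.count "normal" l : Int) - (List.count "high" l : Int) := by
    omega
  rw [hu]
  norm_num
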